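-- pv_equiv track=rewrite | github.com/pollen0/mercor-china | apps/api/app/routers/activities.py | _get_role_tier
-- ===== SOURCE A (Python) =====
-- from typing import Optional, List
--
-- def _get_role_tier(role: Optional[str]) -> int:
--     """Determine role tier from role title."""
--     if not role:
--         return 1
--
--     role_lower = role.lower()
--
--     # Tier 5: President/Founder
--     if any(x in role_lower for x in ["president", "founder", "ceo", "director"]):
--         return 5
--
--     # Tier 4: VP/Executive
--     if any(x in role_lower for x in ["vice president", "vp", "executive", "chair", "head"]):
--         return 4
--
--     # Tier 3: Officer/Lead
--     if any(x in role_lower for x in ["officer", "lead", "manager", "coordinator", "captain"]):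
--         return 3
--
--     # Tier 2: Active member with title
--     if any(x in role_lower for x in ["mentor", "tutor", "developer", "designer", "analyst"]):
--         return 2
--
--     # Tier 1: General member
--     return 1
-- ===== SOURCE B (Python) =====
-- from typing import Optional
--
-- # Flat keyword -> tier map; the result is the MAXIMUM tier among all matching
-- # keywords (A checks tiers in descending order, so its first match is the max).
-- _KEYWORD_TIER = {
--     "president": 5, "founder": 5, "ceo": 5, "director": 5,
--     "vice president": 4, "vp": 4, "executive": 4, "chair": 4, "head": 4,
--     "officer": 3, "lead": 3, "manager": 3, "coordinator": 3, "captain": 3,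
--     "mentor": 2, "tutor": 2, "developer": 2, "designer": 2, "analyst": 2,
-- }
--
-- def _get_role_tier(role: Optional[str]) -> int:
--     """Determine role tier from role title."""
--     if not role:
--         return 1
--     role_lower = role.lower()
--     return max((t for k, t in _KEYWORD_TIER.items() if k in role_lower), default=1)
-- ===== Notes on version B (the rewrite author's own statement) =====
-- stated objective: alternative
-- what changed: Replaces the ordered four-branch short-circuit if-chain by a flat keyword-to-tier map folded with max over all matching keywords (default 1); correct because A's tiers are checked in descending order, so its first match equals the maximum matching tier.
import Mathlib
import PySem

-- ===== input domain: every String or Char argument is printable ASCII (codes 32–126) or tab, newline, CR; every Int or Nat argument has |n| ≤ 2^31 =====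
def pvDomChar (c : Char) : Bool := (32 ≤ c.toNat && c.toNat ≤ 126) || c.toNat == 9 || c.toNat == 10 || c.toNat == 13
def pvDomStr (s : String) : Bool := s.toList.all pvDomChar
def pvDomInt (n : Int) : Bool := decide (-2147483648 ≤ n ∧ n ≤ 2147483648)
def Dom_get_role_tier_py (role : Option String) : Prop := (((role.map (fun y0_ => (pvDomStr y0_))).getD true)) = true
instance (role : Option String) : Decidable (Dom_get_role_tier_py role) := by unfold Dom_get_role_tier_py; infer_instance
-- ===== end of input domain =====

-- B replaces the ordered short-circuit if-chain by a max-fold over a flat keyword->tier map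
-- (default 1); equal because A's tiers descend, so its first match is the maximum matching tier.
-- ===== PORT A =====
def get_role_tier_py (role : Option String) : Int :=
  match role with
  | none => 1
  | some r =>
    if r = "" then 1
    else
      let role_lower := PySem.Str.lower r
      if ["president", "founder", "ceo", "director"].any (fun x => PySem.Str.isIn x role_lower) then 5
      else if ["vice president", "vp", "executive", "chair", "head"].any (fun x => PySem.Str.isIn x role_lower) then 4
      else if ["officer", "lead", "manager", "coordinator", "captain"].any (fun x => PySem.Str.isIn x role_lower) then 3
      else if ["mentor", "tutor", "developer", "designer", "analyst"].any (fun x => PySem.Str.isIn x role_lower) then 2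
      else 1

-- ===== PORT B =====
-- the flat keyword -> tier map of Source B (dict in insertion order = association list)
def pvKeywordTier : List (String × Int) :=
  [("president", 5), ("founder", 5), ("ceo", 5), ("director", 5),
   ("vice president", 4), ("vp", 4), ("executive", 4), ("chair", 4), ("head", 4),
   ("officer", 3), ("lead", 3), ("manager", 3), ("coordinator", 3), ("captain", 3),
   ("mentor", 2), ("tutor", 2), ("developer", 2), ("designer", 2), ("analyst", 2)]

-- max(t for k, t in _KEYWORD_TIER.items() if k in role_lower) with default 1, as a fold
def get_role_tier_py_alt (role : Option String) : Int :=
  match role with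
  | none => 1
  | some r =>
    if r = "" then 1
    else
      let role_lower := PySem.Str.lower r
      pvKeywordTier.foldl
        (fun acc kt => if PySem.Str.isIn kt.1 role_lower then max acc kt.2 else acc) 1

-- ===== PRECONDITION & SPEC =====
def Spec_get_role_tier_py (role : Option String) (out : Int) : Prop := out = get_role_tier_py_alt role
instance (role : Option String) (out : Int) : Decidable (Spec_get_role_tier_py role out) := by unfold Spec_get_role_tier_py; infer_instance

-- ===== CLAIM (what is proved, stated in full; the proofs are below) =====
def Claim_equal_get_role_tier_py : Prop := ∀ (role : Option String), Dom_get_role_tier_py role → Spec_get_role_tier_py role (get_role_tier_py role)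

-- ===== LEMMAS AND PROOFS =====

-- folding a uniform-tier segment is: bump the accumulator iff some keyword matches
theorem pv_foldl_tier_group (s : String) (t a : Int) (ks : List String) :
    (ks.map (fun k => (k, t))).foldl
      (fun acc kt => if PySem.Str.isIn kt.1 s then max acc kt.2 else acc) a
    = if ks.any (fun k => PySem.Str.isIn k s) then max a t else a := by
  induction ks generalizing a with
  | nil => simp
  | cons k rest ih =>
    simp only [List.map_cons, List.foldl_cons, List.any_cons, ih]
    by_cases h1 : PySem.Str.isIn k s = true
    · simp only [h1]; simp
    · simp only [Bool.not_eq_true] at h1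
      simp only [h1]; simp

-- the flat table is the four uniform-tier groups concatenated
theorem pv_table_split :
    pvKeywordTier
    = (["president", "founder", "ceo", "director"].map (fun k => (k, (5 : Int))))
      ++ (["vice president", "vp", "executive", "chair", "head"].map (fun k => (k, (4 : Int))))
      ++ (["officer", "lead", "manager", "coordinator", "captain"].map (fun k => (k, (3 : Int))))
      ++ (["mentor", "tutor", "developer", "designer", "analyst"].map (fun k => (k, (2 : Int)))) := by
  rfl

-- ===== VERDICT (by name: the statement is the Claim_ definition above) =====
theorem get_role_tier_py_spec : Claim_equal_get_role_tier_py := by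
  intro role _
  unfold Spec_get_role_tier_py get_role_tier_py get_role_tier_py_alt
  cases role with
  | none => rfl
  | some r =>
    by_cases hr : r = ""
    · simp [hr]
    · simp only [hr, if_false, pv_table_split, List.foldl_append, pv_foldl_tier_group]
      split_ifs <;> simp
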